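-- pv_equiv track=rewrite | github.com/Nanrbet/Research-Kickstarter | html_data_extractor.py | get_category_data
-- ===== SOURCE A (Python) =====
-- MISSING = ""
--
-- def get_category_data(cat_str):
--     """Returns a tuple of (category, subcategory) from a given cat_str which
--     can be either a category or subcategory.
--
--     Inputs:
--     cat_str = A string which is either a category or subcategory."""
--     categories = {'Art': {'Ceramics', 'Conceptual Art', 'Digital Art', 'Illustration', 'Installations', 'Mixed Media', 'Painting', 'Performance Art', 'Public Art', 'Sculpture', 'Social Practice', 'Textiles', 'Video Art'},
--                 'Comics': {'Anthologies', 'Comic Books', 'Events', 'Graphic Novels', 'Webcomics'},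
--                 'Crafts': {'Candles', 'Crochet', 'DIY', 'Embroidery', 'Glass', 'Knitting', 'Pottery', 'Printing', 'Quilts', 'Stationery', 'Taxidermy', 'Weaving', 'Woodworking'},
--                 'Dance': {'Performances', 'Residencies', 'Spaces', 'Workshops'},
--                 'Design': {'Architecture', 'Civic Design', 'Graphic Design', 'Interactive Design', 'Product Design', 'Toys', 'Typography'},
--                 'Fashion': {'Accessories', 'Apparel', 'Childrenswear', 'Couture', 'Footwear', 'Jewelry', 'Pet Fashion', 'Ready-to-wear'},
--                 'Film & Video': {'Action', 'Animation', 'Comedy', 'Documentary', 'Drama', 'Experimental', 'Family', 'Fantasy', 'Festivals', 'Horror', 'Movie Theaters', 'Music Videos', 'Narrative Film', 'Romance', 'Science Fiction', 'Shorts', 'Television', 'Thrillers', 'Webseries'},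
--                 'Food': {'Bacon', 'Community Gardens', 'Cookbooks', 'Drinks', 'Events', "Farmer's Markets", 'Farms', 'Food Trucks', 'Restaurants', 'Small Batch', 'Spaces', 'Vegan'},
--                 'Games': {'Gaming Hardware', 'Live Games', 'Mobile Games', 'Playing Cards', 'Puzzles', 'Tabletop Games', 'Video Games'},
--                 'Journalism': {'Audio', 'Photo', 'Print', 'Video', 'Web'},
--                 'Music': {'Blues', 'Chiptune', 'Classical Music', 'Comedy', 'Country & Folk', 'Electronic Music', 'Faith', 'Hip-Hop', 'Indie Rock', 'Jazz', 'Kids', 'Latin', 'Metal', 'Pop', 'Punk', 'R&B', 'Rock', 'World Music'},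
--                 'Photography': {'Animals', 'Fine Art', 'Nature', 'People', 'Photobooks', 'Places'},
--                 'Publishing': {'Academic', 'Anthologies', 'Art Books', 'Calendars', "Children's Books", 'Comedy', 'Fiction', 'Letterpress', 'Literary Journals', 'Literary Spaces', 'Nonfiction', 'Periodicals', 'Poetry', 'Radio & Podcasts', 'Translations', 'Young Adult', 'Zines'},
--                 'Technology': {'3D Printing', 'Apps', 'Camera Equipment', 'DIY Electronics', 'Fabrication Tools', 'Flight', 'Gadgets', 'Hardware', 'Makerspaces', 'Robots', 'Software', 'Sound', 'Space Exploration', 'Wearables', 'Web'},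
--                 'Theater': {'Comedy', 'Experimental', 'Festivals', 'Immersive', 'Musical', 'Plays', 'Spaces'}}
--
--     category, subcategory = cat_str, MISSING
--
--     # No way to know subcategory from category.
--     if cat_str not in categories.keys():
--         # Might be given a subcategory so try finding it's category.
--         for category_name, subcategories in categories.items():
--             if cat_str in subcategories:
--                 category = category_name
--                 subcategory = cat_str
--                 break
--
--     return (category, subcategory)
-- ===== SOURCE B (Python) =====
-- MISSING = ""
--
-- # Precomputed inverted index: each subcategory mapped directly to its owning
-- # category.  For subcategories listed under several categories ('Comedy', 'Web',
-- # 'Events', 'Spaces', 'Anthologies', 'Experimental', 'Festivals') the FIRST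
-- # owning category in the original table's order is kept.
-- _CATEGORY_OF = {
--     'Ceramics': 'Art',
--     'Conceptual Art': 'Art',
--     'Digital Art': 'Art',
--     'Illustration': 'Art',
--     'Installations': 'Art',
--     'Mixed Media': 'Art',
--     'Painting': 'Art',
--     'Performance Art': 'Art',
--     'Public Art': 'Art',
--     'Sculpture': 'Art',
--     'Social Practice': 'Art',
--     'Textiles': 'Art',
--     'Video Art': 'Art',
--     'Anthologies': 'Comics',
--     'Comic Books': 'Comics',
--     'Events': 'Comics',
--     'Graphic Novels': 'Comics',
--     'Webcomics': 'Comics',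
--     'Candles': 'Crafts',
--     'Crochet': 'Crafts',
--     'DIY': 'Crafts',
--     'Embroidery': 'Crafts',
--     'Glass': 'Crafts',
--     'Knitting': 'Crafts',
--     'Pottery': 'Crafts',
--     'Printing': 'Crafts',
--     'Quilts': 'Crafts',
--     'Stationery': 'Crafts',
--     'Taxidermy': 'Crafts',
--     'Weaving': 'Crafts',
--     'Woodworking': 'Crafts',
--     'Performances': 'Dance',
--     'Residencies': 'Dance',
--     'Spaces': 'Dance',
--     'Workshops': 'Dance',
--     'Architecture': 'Design',
--     'Civic Design': 'Design',
--     'Graphic Design': 'Design',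
--     'Interactive Design': 'Design',
--     'Product Design': 'Design',
--     'Toys': 'Design',
--     'Typography': 'Design',
--     'Accessories': 'Fashion',
--     'Apparel': 'Fashion',
--     'Childrenswear': 'Fashion',
--     'Couture': 'Fashion',
--     'Footwear': 'Fashion',
--     'Jewelry': 'Fashion',
--     'Pet Fashion': 'Fashion',
--     'Ready-to-wear': 'Fashion',
--     'Action': 'Film & Video',
--     'Animation': 'Film & Video',
--     'Comedy': 'Film & Video',
--     'Documentary': 'Film & Video',
--     'Drama': 'Film & Video',
--     'Experimental': 'Film & Video',
--     'Family': 'Film & Video',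
--     'Fantasy': 'Film & Video',
--     'Festivals': 'Film & Video',
--     'Horror': 'Film & Video',
--     'Movie Theaters': 'Film & Video',
--     'Music Videos': 'Film & Video',
--     'Narrative Film': 'Film & Video',
--     'Romance': 'Film & Video',
--     'Science Fiction': 'Film & Video',
--     'Shorts': 'Film & Video',
--     'Television': 'Film & Video',
--     'Thrillers': 'Film & Video',
--     'Webseries': 'Film & Video',
--     'Bacon': 'Food',
--     'Community Gardens': 'Food',
--     'Cookbooks': 'Food',
--     'Drinks': 'Food',
--     "Farmer's Markets": 'Food',
--     'Farms': 'Food',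
--     'Food Trucks': 'Food',
--     'Restaurants': 'Food',
--     'Small Batch': 'Food',
--     'Vegan': 'Food',
--     'Gaming Hardware': 'Games',
--     'Live Games': 'Games',
--     'Mobile Games': 'Games',
--     'Playing Cards': 'Games',
--     'Puzzles': 'Games',
--     'Tabletop Games': 'Games',
--     'Video Games': 'Games',
--     'Audio': 'Journalism',
--     'Photo': 'Journalism',
--     'Print': 'Journalism',
--     'Video': 'Journalism',
--     'Web': 'Journalism',
--     'Blues': 'Music',
--     'Chiptune': 'Music',
--     'Classical Music': 'Music',
--     'Country & Folk': 'Music',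
--     'Electronic Music': 'Music',
--     'Faith': 'Music',
--     'Hip-Hop': 'Music',
--     'Indie Rock': 'Music',
--     'Jazz': 'Music',
--     'Kids': 'Music',
--     'Latin': 'Music',
--     'Metal': 'Music',
--     'Pop': 'Music',
--     'Punk': 'Music',
--     'R&B': 'Music',
--     'Rock': 'Music',
--     'World Music': 'Music',
--     'Animals': 'Photography',
--     'Fine Art': 'Photography',
--     'Nature': 'Photography',
--     'People': 'Photography',
--     'Photobooks': 'Photography',
--     'Places': 'Photography',
--     'Academic': 'Publishing',
--     'Art Books': 'Publishing',
--     'Calendars': 'Publishing',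
--     "Children's Books": 'Publishing',
--     'Fiction': 'Publishing',
--     'Letterpress': 'Publishing',
--     'Literary Journals': 'Publishing',
--     'Literary Spaces': 'Publishing',
--     'Nonfiction': 'Publishing',
--     'Periodicals': 'Publishing',
--     'Poetry': 'Publishing',
--     'Radio & Podcasts': 'Publishing',
--     'Translations': 'Publishing',
--     'Young Adult': 'Publishing',
--     'Zines': 'Publishing',
--     '3D Printing': 'Technology',
--     'Apps': 'Technology',
--     'Camera Equipment': 'Technology',
--     'DIY Electronics': 'Technology',
--     'Fabrication Tools': 'Technology',
--     'Flight': 'Technology',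
--     'Gadgets': 'Technology',
--     'Hardware': 'Technology',
--     'Makerspaces': 'Technology',
--     'Robots': 'Technology',
--     'Software': 'Technology',
--     'Sound': 'Technology',
--     'Space Exploration': 'Technology',
--     'Wearables': 'Technology',
--     'Immersive': 'Theater',
--     'Musical': 'Theater',
--     'Plays': 'Theater',
-- }
--
-- def get_category_data(cat_str):
--     """Returns a tuple of (category, subcategory) from a given cat_str which
--     can be either a category or subcategory."""
--     cat = _CATEGORY_OF.get(cat_str)
--     return (cat, cat_str) if cat is not None else (cat_str, MISSING)
-- ===== Notes on version B (the rewrite author's own statement) =====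
-- stated objective: simpler
-- what changed: Replaces A's per-call key-membership test plus linear scan over the 15 category sets by a precomputed inverted index (a flat subcategory-to-category dict, first owning category kept for duplicated subcategories), so the function body is a single dict lookup.
import Mathlib
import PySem

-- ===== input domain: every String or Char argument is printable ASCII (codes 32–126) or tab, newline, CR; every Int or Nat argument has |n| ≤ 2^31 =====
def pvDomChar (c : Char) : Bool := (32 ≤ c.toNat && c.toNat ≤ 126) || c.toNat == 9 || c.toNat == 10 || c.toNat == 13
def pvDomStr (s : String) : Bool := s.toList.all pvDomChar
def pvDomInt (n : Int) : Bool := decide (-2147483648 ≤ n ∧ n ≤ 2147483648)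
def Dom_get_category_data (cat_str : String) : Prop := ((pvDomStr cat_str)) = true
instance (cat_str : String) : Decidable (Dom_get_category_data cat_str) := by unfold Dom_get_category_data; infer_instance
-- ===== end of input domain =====

-- B replaces A's per-call key-membership test plus linear scan over the category→subcategories
-- table by a precomputed inverted index (subcategory→category, first owner kept) and a single
-- lookup (objective: simpler).

-- ===== PORT A =====
def pvMISSING : String := ""

-- A's local `categories` dict (values are Python sets, held as lists of their distinct elements)
def pvCategoriesA : PySem.Dict String (List String) := PySem.Dict.mk [
  ("Art", ["Ceramics", "Conceptual Art", "Digital Art", "Illustration", "Installations", "Mixed Media", "Painting", "Performance Art", "Public Art", "Sculpture", "Social Practice", "Textiles", "Video Art"]),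
  ("Comics", ["Anthologies", "Comic Books", "Events", "Graphic Novels", "Webcomics"]),
  ("Crafts", ["Candles", "Crochet", "DIY", "Embroidery", "Glass", "Knitting", "Pottery", "Printing", "Quilts", "Stationery", "Taxidermy", "Weaving", "Woodworking"]),
  ("Dance", ["Performances", "Residencies", "Spaces", "Workshops"]),
  ("Design", ["Architecture", "Civic Design", "Graphic Design", "Interactive Design", "Product Design", "Toys", "Typography"]),
  ("Fashion", ["Accessories", "Apparel", "Childrenswear", "Couture", "Footwear", "Jewelry", "Pet Fashion", "Ready-to-wear"]),
  ("Film & Video", ["Action", "Animation", "Comedy", "Documentary", "Drama", "Experimental", "Family", "Fantasy", "Festivals", "Horror", "Movie Theaters", "Music Videos", "Narrative Film", "Romance", "Science Fiction", "Shorts", "Television", "Thrillers", "Webseries"]),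
  ("Food", ["Bacon", "Community Gardens", "Cookbooks", "Drinks", "Events", "Farmer's Markets", "Farms", "Food Trucks", "Restaurants", "Small Batch", "Spaces", "Vegan"]),
  ("Games", ["Gaming Hardware", "Live Games", "Mobile Games", "Playing Cards", "Puzzles", "Tabletop Games", "Video Games"]),
  ("Journalism", ["Audio", "Photo", "Print", "Video", "Web"]),
  ("Music", ["Blues", "Chiptune", "Classical Music", "Comedy", "Country & Folk", "Electronic Music", "Faith", "Hip-Hop", "Indie Rock", "Jazz", "Kids", "Latin", "Metal", "Pop", "Punk", "R&B", "Rock", "World Music"]),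
  ("Photography", ["Animals", "Fine Art", "Nature", "People", "Photobooks", "Places"]),
  ("Publishing", ["Academic", "Anthologies", "Art Books", "Calendars", "Children's Books", "Comedy", "Fiction", "Letterpress", "Literary Journals", "Literary Spaces", "Nonfiction", "Periodicals", "Poetry", "Radio & Podcasts", "Translations", "Young Adult", "Zines"]),
  ("Technology", ["3D Printing", "Apps", "Camera Equipment", "DIY Electronics", "Fabrication Tools", "Flight", "Gadgets", "Hardware", "Makerspaces", "Robots", "Software", "Sound", "Space Exploration", "Wearables", "Web"]),
  ("Theater", ["Comedy", "Experimental", "Festivals", "Immersive", "Musical", "Plays", "Spaces"])]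

-- Literal port of A: membership test on the keys, then a linear scan with break (find?).
def get_category_data (cat_str : String) : String × String :=
  if pvCategoriesA.contains cat_str then
    (cat_str, pvMISSING)
  else
    match pvCategoriesA.items.find? (fun p => p.2.contains cat_str) with
    | some p => (p.1, cat_str)
    | none => (cat_str, pvMISSING)

-- ===== PORT B =====
-- Source B's precomputed inverted index _CATEGORY_OF (subcategory → owning category; first owner kept).
def pvCategoryOf : PySem.Dict String String := PySem.Dict.mk [
  ("Ceramics", "Art"),
  ("Conceptual Art", "Art"),
  ("Digital Art", "Art"),
  ("Illustration", "Art"),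
  ("Installations", "Art"),
  ("Mixed Media", "Art"),
  ("Painting", "Art"),
  ("Performance Art", "Art"),
  ("Public Art", "Art"),
  ("Sculpture", "Art"),
  ("Social Practice", "Art"),
  ("Textiles", "Art"),
  ("Video Art", "Art"),
  ("Anthologies", "Comics"),
  ("Comic Books", "Comics"),
  ("Events", "Comics"),
  ("Graphic Novels", "Comics"),
  ("Webcomics", "Comics"),
  ("Candles", "Crafts"),
  ("Crochet", "Crafts"),
  ("DIY", "Crafts"),
  ("Embroidery", "Crafts"),
  ("Glass", "Crafts"),
  ("Knitting", "Crafts"),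
  ("Pottery", "Crafts"),
  ("Printing", "Crafts"),
  ("Quilts", "Crafts"),
  ("Stationery", "Crafts"),
  ("Taxidermy", "Crafts"),
  ("Weaving", "Crafts"),
  ("Woodworking", "Crafts"),
  ("Performances", "Dance"),
  ("Residencies", "Dance"),
  ("Spaces", "Dance"),
  ("Workshops", "Dance"),
  ("Architecture", "Design"),
  ("Civic Design", "Design"),
  ("Graphic Design", "Design"),
  ("Interactive Design", "Design"),
  ("Product Design", "Design"),
  ("Toys", "Design"),
  ("Typography", "Design"),
  ("Accessories", "Fashion"),
  ("Apparel", "Fashion"),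
  ("Childrenswear", "Fashion"),
  ("Couture", "Fashion"),
  ("Footwear", "Fashion"),
  ("Jewelry", "Fashion"),
  ("Pet Fashion", "Fashion"),
  ("Ready-to-wear", "Fashion"),
  ("Action", "Film & Video"),
  ("Animation", "Film & Video"),
  ("Comedy", "Film & Video"),
  ("Documentary", "Film & Video"),
  ("Drama", "Film & Video"),
  ("Experimental", "Film & Video"),
  ("Family", "Film & Video"),
  ("Fantasy", "Film & Video"),
  ("Festivals", "Film & Video"),
  ("Horror", "Film & Video"),
  ("Movie Theaters", "Film & Video"),
  ("Music Videos", "Film & Video"),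
  ("Narrative Film", "Film & Video"),
  ("Romance", "Film & Video"),
  ("Science Fiction", "Film & Video"),
  ("Shorts", "Film & Video"),
  ("Television", "Film & Video"),
  ("Thrillers", "Film & Video"),
  ("Webseries", "Film & Video"),
  ("Bacon", "Food"),
  ("Community Gardens", "Food"),
  ("Cookbooks", "Food"),
  ("Drinks", "Food"),
  ("Farmer's Markets", "Food"),
  ("Farms", "Food"),
  ("Food Trucks", "Food"),
  ("Restaurants", "Food"),
  ("Small Batch", "Food"),
  ("Vegan", "Food"),
  ("Gaming Hardware", "Games"),
  ("Live Games", "Games"),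
  ("Mobile Games", "Games"),
  ("Playing Cards", "Games"),
  ("Puzzles", "Games"),
  ("Tabletop Games", "Games"),
  ("Video Games", "Games"),
  ("Audio", "Journalism"),
  ("Photo", "Journalism"),
  ("Print", "Journalism"),
  ("Video", "Journalism"),
  ("Web", "Journalism"),
  ("Blues", "Music"),
  ("Chiptune", "Music"),
  ("Classical Music", "Music"),
  ("Country & Folk", "Music"),
  ("Electronic Music", "Music"),
  ("Faith", "Music"),
  ("Hip-Hop", "Music"),
  ("Indie Rock", "Music"),
  ("Jazz", "Music"),
  ("Kids", "Music"),
  ("Latin", "Music"),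
  ("Metal", "Music"),
  ("Pop", "Music"),
  ("Punk", "Music"),
  ("R&B", "Music"),
  ("Rock", "Music"),
  ("World Music", "Music"),
  ("Animals", "Photography"),
  ("Fine Art", "Photography"),
  ("Nature", "Photography"),
  ("People", "Photography"),
  ("Photobooks", "Photography"),
  ("Places", "Photography"),
  ("Academic", "Publishing"),
  ("Art Books", "Publishing"),
  ("Calendars", "Publishing"),
  ("Children's Books", "Publishing"),
  ("Fiction", "Publishing"),
  ("Letterpress", "Publishing"),
  ("Literary Journals", "Publishing"),
  ("Literary Spaces", "Publishing"),
  ("Nonfiction", "Publishing"),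
  ("Periodicals", "Publishing"),
  ("Poetry", "Publishing"),
  ("Radio & Podcasts", "Publishing"),
  ("Translations", "Publishing"),
  ("Young Adult", "Publishing"),
  ("Zines", "Publishing"),
  ("3D Printing", "Technology"),
  ("Apps", "Technology"),
  ("Camera Equipment", "Technology"),
  ("DIY Electronics", "Technology"),
  ("Fabrication Tools", "Technology"),
  ("Flight", "Technology"),
  ("Gadgets", "Technology"),
  ("Hardware", "Technology"),
  ("Makerspaces", "Technology"),
  ("Robots", "Technology"),
  ("Software", "Technology"),
  ("Sound", "Technology"),
  ("Space Exploration", "Technology"),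
  ("Wearables", "Technology"),
  ("Immersive", "Theater"),
  ("Musical", "Theater"),
  ("Plays", "Theater")]

-- Literal port of B's function body: one dict lookup.
def get_category_data_alt (cat_str : String) : String × String :=
  match pvCategoryOf.get? cat_str with
  | some cat => (cat, cat_str)
  | none => (cat_str, pvMISSING)

-- ===== PRECONDITION & SPEC =====
def Spec_get_category_data (cat_str : String) (out : String × String) : Prop := out = get_category_data_alt cat_str
instance (cat_str : String) (out : String × String) : Decidable (Spec_get_category_data cat_str out) := by unfold Spec_get_category_data; infer_instance

-- ===== CLAIM (what is proved, stated in full; the proofs are below) =====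
def Claim_equal_get_category_data : Prop := ∀ (cat_str : String), Dom_get_category_data cat_str → Spec_get_category_data cat_str (get_category_data cat_str)

-- ===== LEMMAS AND PROOFS =====

-- Every subcategory of A's table is a key of B's inverted index (closed fact about the two literals).
theorem subs_sub_keys :
    pvCategoriesA.items.all (fun p => p.2.all (fun s => pvCategoryOf.contains s)) = true := by decide

-- Off the index: a string that is not a key of the inverted index occurs in no subcategory list,
-- so A's scan finds nothing.
theorem find?_eq_none_of_not_key (s : String) (h : pvCategoryOf.contains s = false) :
    pvCategoriesA.items.find? (fun p => p.2.contains s) = none := by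
  rw [List.find?_eq_none]
  intro p hp
  simp only [Bool.not_eq_true, List.contains_eq_mem, decide_eq_false_iff_not]
  intro hm
  have h1 := List.all_eq_true.mp subs_sub_keys p hp
  have h2 := List.all_eq_true.mp h1 s hm
  rw [h] at h2
  exact Bool.false_ne_true h2

-- On the index: for each of the finitely many subcategory keys, the two ports agree (closed computation).
theorem agree_on_keys :
    pvCategoryOf.items.all
      (fun p => decide (get_category_data p.1 = get_category_data_alt p.1)) = true := by decide

-- ===== VERDICT (by name: the statement is the Claim_ definition above) =====
theorem get_category_data_spec : Claim_equal_get_category_data := by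
  intro s _
  unfold Spec_get_category_data
  by_cases hk : pvCategoryOf.contains s = true
  · -- s is one of the finitely many subcategory keys: agree_on_keys covers it.
    have hmem : s ∈ pvCategoryOf.items.map Prod.fst := by
      have := (PySem.Dict.contains_iff_mem_keys pvCategoryOf s).mp hk
      simpa [PySem.Dict.keys] using this
    obtain ⟨p, hp, hs⟩ := List.mem_map.mp hmem
    subst hs
    exact of_decide_eq_true (List.all_eq_true.mp agree_on_keys p hp)
  · -- s is not a subcategory: B misses, and A's scan finds nothing either.
    unfold get_category_data get_category_data_alt
    have hkf : pvCategoryOf.contains s = false := by simpa using hk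
    have hnone : pvCategoryOf.get? s = none :=
      (PySem.Dict.get?_eq_none_iff_contains pvCategoryOf s).mpr hkf
    rw [hnone, find?_eq_none_of_not_key s hkf]
    split <;> rfl
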